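-- pv_equiv track=rewrite | github.com/eunjng5474/Algorithm | 프로그래머스/lv2/17677. ［1차］ 뉴스 클러스터링/［1차］ 뉴스 클러스터링.py | solution
-- ===== SOURCE A (Python) =====
-- from collections import Counter
--
-- def solution(str1, str2):
--     answer = 0
--     low_str1 = str1.lower()
--     low_str2 = str2.lower()
--
--     str1_lst = []
--     str2_lst = []
--
--     for i in range(len(low_str1) - 1):
--         if low_str1[i].isalpha() and low_str1[i+1].isalpha():
--             str1_lst.append(low_str1[i:i+2])
--
--     for i in range(len(low_str2) - 1):
--         if low_str2[i].isalpha() and low_str2[i+1].isalpha():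
--             str2_lst.append(low_str2[i:i+2])
--
--     intersection = list((Counter(str1_lst) & Counter(str2_lst)).elements())
--     union = list((Counter(str1_lst) | Counter(str2_lst)).elements())
--
--     if len(intersection) == 0 and len(union) == 0:
--         return 65536
--     else:
--         return int(len(intersection) / len(union) * 65536)
--
--
--
--     return answer
-- ===== SOURCE B (Python) =====
-- def solution(str1, str2):
--     def bigrams(s):
--         s = s.lower()
--         return [s[i:i+2] for i in range(len(s) - 1)
--                 if s[i].isalpha() and s[i+1].isalpha()]
--
--     l1 = bigrams(str1)
--     l2 = bigrams(str2)
--     # greedy matching: pair each bigram of l1 with an unused equal bigram of l2;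
--     # the number of pairs is the multiset-intersection size (no counters built)
--     rest = list(l2)
--     inter = 0
--     for g in l1:
--         if g in rest:
--             rest.remove(g)
--             inter += 1
--     union = len(l1) + len(l2) - inter
--     return 65536 if union == 0 else inter * 65536 // union
-- ===== Notes on version B (the rewrite author's own statement) =====
-- stated objective: alternative
-- what changed: B drops counting entirely: instead of Counters/dicts it computes the multiset-intersection size by greedy matching (walk l1, remove each matched bigram from a working copy of l2, count the matches) and gets the union size by inclusion-exclusion len1 + len2 - inter; the guard and scaling stay arithmetic.
import Mathlib
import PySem

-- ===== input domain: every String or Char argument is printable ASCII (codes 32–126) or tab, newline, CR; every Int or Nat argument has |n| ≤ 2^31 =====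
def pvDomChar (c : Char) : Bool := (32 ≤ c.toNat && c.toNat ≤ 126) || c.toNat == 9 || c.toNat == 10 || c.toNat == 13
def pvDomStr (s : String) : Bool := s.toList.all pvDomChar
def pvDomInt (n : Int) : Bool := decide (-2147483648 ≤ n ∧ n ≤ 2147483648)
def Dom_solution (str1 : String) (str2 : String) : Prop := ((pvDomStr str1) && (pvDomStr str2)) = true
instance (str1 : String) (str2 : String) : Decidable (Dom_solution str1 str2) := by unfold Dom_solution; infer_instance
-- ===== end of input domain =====

-- B replaces A's Counter machinery (two Counters, derived &/| Counters and their element lists)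
-- by greedy matching with removal for the intersection size and inclusion-exclusion for the
-- union size (objective: alternative — no counting structures at all).

-- ===== PORT A =====
-- bigram loop: 'for i in range(len(s)-1): if s[i].isalpha() and s[i+1].isalpha(): lst.append(s[i:i+2])'
def pvBigramsA (s : List Char) : List (List Char) :=
  (List.range (s.length - 1)).foldl
    (fun acc i =>
      if PySem.Chars.isalpha (s.getD i ' ') && PySem.Chars.isalpha (s.getD (i+1) ' ')
      then acc ++ [PySem.List.slice s (some (i : Int)) (some ((i : Int) + 2))]
      else acc) []

-- Counter.__and__ : for elem,count in self.items(): m = min(count, other[elem]); keep if m > 0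
def pvCounterAnd (c1 c2 : PySem.Dict (List Char) Int) : PySem.Dict (List Char) Int :=
  c1.items.foldl
    (fun r kv =>
      if 0 < min kv.2 (c2.getD kv.1 0) then r.insert kv.1 (min kv.2 (c2.getD kv.1 0)) else r)
    PySem.Dict.empty

-- Counter.__or__ : maxima over self's keys, then other's keys not in self
def pvCounterOr (c1 c2 : PySem.Dict (List Char) Int) : PySem.Dict (List Char) Int :=
  let r := c1.items.foldl
    (fun r kv =>
      if 0 < max kv.2 (c2.getD kv.1 0) then r.insert kv.1 (max kv.2 (c2.getD kv.1 0)) else r)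
    PySem.Dict.empty
  c2.items.foldl
    (fun r kv =>
      if c1.contains kv.1 = false ∧ 0 < kv.2 then r.insert kv.1 kv.2 else r) r

-- Counter.elements(): each key repeated count times, in item order
def pvElements (c : PySem.Dict (List Char) Int) : List (List Char) :=
  c.items.foldl (fun acc kv => acc ++ List.replicate kv.2.toNat kv.1) []

def solution (str1 : String) (str2 : String) : Int :=
  let l1 := pvBigramsA (PySem.Str.lower str1).toList
  let l2 := pvBigramsA (PySem.Str.lower str2).toList
  let inter := pvElements (pvCounterAnd (PySem.Dict.counter l1) (PySem.Dict.counter l2))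
  let uni := pvElements (pvCounterOr (PySem.Dict.counter l1) (PySem.Dict.counter l2))
  if inter.length = 0 ∧ uni.length = 0 then 65536
  else
    -- int(len(inter)/len(uni)*65536): the *65536 is an exact float multiply, so this is the
    -- floor of the exact ratio for every list length reachable here; ported as exact floor division
    PySem.Int.floordiv ((inter.length : Int) * 65536) (uni.length : Int)

-- ===== PORT B =====
-- comprehension: [s[i:i+2] for i in range(len(s)-1) if s[i].isalpha() and s[i+1].isalpha()]
def pvBigramsB (s : List Char) : List (List Char) :=
  ((List.range (s.length - 1)).filter
    (fun i => PySem.Chars.isalpha (s.getD i ' ') && PySem.Chars.isalpha (s.getD (i+1) ' '))).map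
    (fun (i : Nat) => PySem.List.slice s (some (i : Int)) (some ((i : Int) + 2)))

-- greedy matching loop: 'for g in l1: if g in rest: rest.remove(g); inter += 1'
-- (state = (rest, inter); list.remove removes the first occurrence = List.erase)
def pvGreedy (l1 l2 : List (List Char)) : List (List Char) × Int :=
  l1.foldl (fun st g => if g ∈ st.1 then (st.1.erase g, st.2 + 1) else st) (l2, 0)

def solution_alt (str1 : String) (str2 : String) : Int :=
  let l1 := pvBigramsB (PySem.Str.lower str1).toList
  let l2 := pvBigramsB (PySem.Str.lower str2).toList
  let inter := (pvGreedy l1 l2).2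
  let uni := (l1.length : Int) + (l2.length : Int) - inter
  if uni = 0 then 65536 else PySem.Int.floordiv (inter * 65536) uni

-- ===== PRECONDITION & SPEC =====
def Spec_solution (str1 : String) (str2 : String) (out : Int) : Prop := out = solution_alt str1 str2
instance (str1 : String) (str2 : String) (out : Int) : Decidable (Spec_solution str1 str2 out) := by unfold Spec_solution; infer_instance

-- ===== CLAIM (what is proved, stated in full; the proofs are below) =====
def Claim_equal_solution : Prop := ∀ (str1 : String) (str2 : String), Dom_solution str1 str2 → Spec_solution str1 str2 (solution str1 str2)

-- ===== LEMMAS AND PROOFS =====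

-- the two bigram builders produce the same list
theorem pvBigrams_eq (s : List Char) : pvBigramsA s = pvBigramsB s := by
  unfold pvBigramsA pvBigramsB
  rw [PySem.List.foldl_append_if]
  exact List.nil_append _

-- items of a 'insert fresh distinct keys when condition holds' loop
theorem items_foldl_insertIf {k : Type} [BEq k] [LawfulBEq k]
    (c : k × Int → Prop) [DecidablePred c] (g : k × Int → Int)
    (L : List (k × Int)) (d : PySem.Dict k Int)
    (hnd : (L.map Prod.fst).Nodup)
    (hfresh : ∀ kv ∈ L, c kv → d.contains kv.1 = false) :
    (L.foldl (fun r kv => if c kv then r.insert kv.1 (g kv) else r) d).items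
      = d.items ++ L.filterMap (fun kv => if c kv then some (kv.1, g kv) else none) := by
  induction L generalizing d with
  | nil => simp
  | cons kv L ih =>
    simp only [List.map_cons, List.nodup_cons] at hnd
    by_cases hc : c kv
    · have hdc : d.contains kv.1 = false := hfresh kv (List.mem_cons_self ..) hc
      have hfresh' : ∀ kv' ∈ L, c kv' → (d.insert kv.1 (g kv)).contains kv'.1 = false := by
        intro kv' hkv' hc'
        rw [PySem.Dict.contains_insert]
        have hne : kv'.1 ≠ kv.1 := by
          intro h; exact hnd.1 (h ▸ List.mem_map_of_mem hkv')
        simp [hne, hfresh kv' (List.mem_cons_of_mem _ hkv') hc']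
      simp only [List.foldl_cons, List.filterMap_cons, if_pos hc]
      rw [ih (d.insert kv.1 (g kv)) hnd.2 hfresh',
        PySem.Dict.items_insert_of_not_contains _ _ hdc]
      simp
    · simp only [List.foldl_cons, List.filterMap_cons, if_neg hc]
      exact ih d hnd.2 (fun kv' h hc' => hfresh kv' (List.mem_cons_of_mem _ h) hc')

theorem length_pvElements (d : PySem.Dict (List Char) Int) :
    (pvElements d).length = (d.items.map (fun kv => kv.2.toNat)).sum := by
  unfold pvElements
  rw [PySem.List.foldl_append_eq_flatMap]
  simp

-- sum helpers
theorem pv_sum_toNat_filterMap {k : Type} (K : List k) (c : k → Prop) [DecidablePred c]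
    (w : k → Int) (h : ∀ x ∈ K, c x → 0 ≤ w x) :
    ((((K.filterMap (fun x => if c x then some (x, w x) else none)).map
        (fun kv => kv.2.toNat)).sum : Nat) : Int)
      = (K.map (fun x => if c x then w x else 0)).sum := by
  induction K with
  | nil => simp
  | cons a K ih =>
    have ih' := ih (fun x hx => h x (List.mem_cons_of_mem _ hx))
    by_cases hc : c a
    · simp only [List.filterMap_cons, if_pos hc, List.map_cons, List.sum_cons, Nat.cast_add]
      rw [ih', Int.toNat_of_nonneg (h a (List.mem_cons_self ..) hc)]
    · simp only [List.filterMap_cons, if_neg hc, List.map_cons, List.sum_cons]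
      rw [ih']
      simp

theorem pv_sum_map_add {k : Type} (K : List k) (f g : k → Int) :
    (K.map (fun x => f x + g x)).sum = (K.map f).sum + (K.map g).sum := by
  induction K with
  | nil => simp
  | cons a K ih => simp only [List.map_cons, List.sum_cons, ih]; ring

theorem pv_sum_if_filter {k : Type} (K : List k) (p : k → Prop) [DecidablePred p]
    (f : k → Int) :
    (K.map (fun x => if p x then f x else 0)).sum
      = ((K.filter (fun x => decide (p x))).map f).sum := by
  induction K with
  | nil => simp
  | cons a K ih => by_cases h : p a <;> simp [h, ih]

theorem pv_sum_if_split {k : Type} (K : List k) (p : k → Prop) [DecidablePred p]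
    (w : k → Int) :
    (K.map (fun x => if p x then w x else 0)).sum
      + (K.map (fun x => if p x then 0 else w x)).sum = (K.map w).sum := by
  induction K with
  | nil => simp
  | cons a K ih =>
    simp only [List.map_cons, List.sum_cons]
    by_cases h : p a <;> simp [h] <;> omega

theorem pv_sum_indicator {k : Type} [DecidableEq k] (K : List k) (x : k)
    (hnd : K.Nodup) (hx : x ∈ K) :
    (K.map (fun y => if x = y then (1 : Int) else 0)).sum = 1 := by
  induction K with
  | nil => cases hx
  | cons a K ih =>
    simp only [List.nodup_cons] at hnd
    rcases List.mem_cons.1 hx with h | h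
    · subst h
      have : (K.map (fun y => if x = y then (1 : Int) else 0)).sum = 0 := by
        apply List.sum_eq_zero
        intro v hv
        rcases List.mem_map.1 hv with ⟨y, hy, hvy⟩
        have : x ≠ y := fun h => hnd.1 (h ▸ hy)
        simp [this] at hvy
        omega
      simp [this]
    · have hax : x ≠ a := fun he => hnd.1 (he ▸ h)
      simp only [List.map_cons, List.sum_cons, if_neg hax, ih hnd.2 h]
      ring

theorem pv_sum_count {k : Type} [BEq k] [LawfulBEq k] [DecidableEq k] (l K : List k)
    (hnd : K.Nodup) (hsub : ∀ x ∈ l, x ∈ K) :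
    (K.map (fun x => (l.count x : Int))).sum = l.length := by
  induction l with
  | nil => simp
  | cons a l ih =>
    have hstep : (K.map (fun x => ((a :: l).count x : Int)))
        = K.map (fun x => (l.count x : Int) + (if a = x then (1 : Int) else 0)) := by
      apply List.map_congr_left
      intro x _
      by_cases h : a = x <;> simp [h]
    rw [hstep, pv_sum_map_add, ih (fun x hx => hsub x (List.mem_cons_of_mem _ hx)),
      pv_sum_indicator K a hnd (hsub a (List.mem_cons_self ..))]
    simp

theorem pv_sum_map_le {k : Type} (K : List k) (f g : k → Int) (h : ∀ x ∈ K, f x ≤ g x) :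
    (K.map f).sum ≤ (K.map g).sum := by
  induction K with
  | nil => simp
  | cons a K ih =>
    simp only [List.map_cons, List.sum_cons]
    exact add_le_add (h a (List.mem_cons_self ..))
      (ih (fun x hx => h x (List.mem_cons_of_mem _ hx)))

-- a Dict contains x exactly when x is among its keys, Bool-false form
theorem pv_contains_false_iff {k : Type} [BEq k] [LawfulBEq k]
    (d : PySem.Dict k Int) (x : k) : d.contains x = false ↔ x ∉ d.keys := by
  rw [← PySem.Dict.contains_iff_mem_keys]
  cases h : d.contains x <;> simp

theorem pv_counter_contains_false_iff (l : List (List Char)) (x : List Char) :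
    (PySem.Dict.counter l).contains x = false ↔ x ∉ l := by
  rw [pv_contains_false_iff, PySem.Dict.keys_counter, PySem.Set.mem_ofList]

-- items of A's intersection Counter
theorem pv_itemsAnd (l1 l2 : List (List Char)) :
    (pvCounterAnd (PySem.Dict.counter l1) (PySem.Dict.counter l2)).items
      = (PySem.Dict.counter l1).items.filterMap
          (fun kv => if 0 < min kv.2 ((PySem.Dict.counter l2).getD kv.1 0)
            then some (kv.1, min kv.2 ((PySem.Dict.counter l2).getD kv.1 0)) else none) := by
  unfold pvCounterAnd
  rw [items_foldl_insertIf
      (c := fun kv => 0 < min kv.2 ((PySem.Dict.counter l2).getD kv.1 0))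
      (g := fun kv => min kv.2 ((PySem.Dict.counter l2).getD kv.1 0))]
  · simp [PySem.Dict.empty]
  · have h := PySem.Dict.nodup_keys_counter (xs := l1)
    simpa [PySem.Dict.keys] using h
  · intro kv _ _
    exact PySem.Dict.contains_empty ..

-- items of the first loop of A's union Counter
theorem pv_itemsOr1 (l1 l2 : List (List Char)) :
    ((PySem.Dict.counter l1).items.foldl
      (fun r kv =>
        if 0 < max kv.2 ((PySem.Dict.counter l2).getD kv.1 0)
        then r.insert kv.1 (max kv.2 ((PySem.Dict.counter l2).getD kv.1 0)) else r)
      PySem.Dict.empty).items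
      = (PySem.Dict.counter l1).items.filterMap
          (fun kv => if 0 < max kv.2 ((PySem.Dict.counter l2).getD kv.1 0)
            then some (kv.1, max kv.2 ((PySem.Dict.counter l2).getD kv.1 0)) else none) := by
  rw [items_foldl_insertIf
      (c := fun kv => 0 < max kv.2 ((PySem.Dict.counter l2).getD kv.1 0))
      (g := fun kv => max kv.2 ((PySem.Dict.counter l2).getD kv.1 0))]
  · simp [PySem.Dict.empty]
  · have h := PySem.Dict.nodup_keys_counter (xs := l1)
    simpa [PySem.Dict.keys] using h
  · intro kv _ _
    exact PySem.Dict.contains_empty ..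

-- items of A's union Counter: maxima over l1's keys, then l2's keys not in l1
theorem pv_itemsOr (l1 l2 : List (List Char)) :
    (pvCounterOr (PySem.Dict.counter l1) (PySem.Dict.counter l2)).items
      = (PySem.Dict.counter l1).items.filterMap
          (fun kv => if 0 < max kv.2 ((PySem.Dict.counter l2).getD kv.1 0)
            then some (kv.1, max kv.2 ((PySem.Dict.counter l2).getD kv.1 0)) else none)
        ++ (PySem.Dict.counter l2).items.filterMap
          (fun kv => if ((PySem.Dict.counter l1).contains kv.1 = false ∧ 0 < kv.2)
            then some (kv.1, kv.2) else none) := by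
  simp only [pvCounterOr]
  rw [items_foldl_insertIf
      (c := fun kv => (PySem.Dict.counter l1).contains kv.1 = false ∧ 0 < kv.2)
      (g := fun kv => kv.2)]
  · rw [pv_itemsOr1]
  · have h := PySem.Dict.nodup_keys_counter (xs := l2)
    simpa [PySem.Dict.keys] using h
  · intro kv hkv hc
    rw [pv_contains_false_iff]
    intro hmem
    -- keys of the first-loop dict all come from l1's keys
    simp only [PySem.Dict.keys, pv_itemsOr1] at hmem
    rcases List.mem_map.1 hmem with ⟨kv', hkv', hfst⟩
    rcases List.mem_filterMap.1 hkv' with ⟨kv'', hkv'', heq⟩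
    by_cases hpos : 0 < max kv''.2 ((PySem.Dict.counter l2).getD kv''.1 0)
    · rw [if_pos hpos] at heq
      have h1 : kv'.1 = kv''.1 := by cases heq; rfl
      have h2 : kv''.1 ∈ (PySem.Dict.counter l1).keys :=
        PySem.Dict.mem_keys_of_mem_items _ hkv''
      rw [PySem.Dict.keys_counter, PySem.Set.mem_ofList] at h2
      have h3 : kv.1 ∉ l1 := (pv_counter_contains_false_iff l1 kv.1).1 hc.1
      exact h3 (hfst ▸ h1 ▸ h2)
    · rw [if_neg hpos] at heq
      cases heq

-- size of A's intersection multiset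
theorem pv_interA_eq (l1 l2 : List (List Char)) :
    (((pvElements (pvCounterAnd (PySem.Dict.counter l1) (PySem.Dict.counter l2))).length : Nat) : Int)
      = ((PySem.Set.ofList l1).map
          (fun x => min (l1.count x : Int) (l2.count x : Int))).sum := by
  rw [length_pvElements, pv_itemsAnd, PySem.Dict.items_counter, List.filterMap_map]
  have h := pv_sum_toNat_filterMap (PySem.Set.ofList l1)
      (fun x => 0 < min ((l1.count x : Nat) : Int) ((PySem.Dict.counter l2).getD x 0))
      (fun x => min ((l1.count x : Nat) : Int) ((PySem.Dict.counter l2).getD x 0))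
      (fun x _ hx => le_of_lt hx)
  simp only [Function.comp_def] at h ⊢
  rw [h]
  apply congrArg
  apply List.map_congr_left
  intro x _
  rw [PySem.Dict.getD_counter]
  have h1 : (0 : Int) ≤ (l1.count x : Int) := Int.natCast_nonneg _
  have h2 : (0 : Int) ≤ (l2.count x : Int) := Int.natCast_nonneg _
  by_cases hp : 0 < min ((l1.count x : Nat) : Int) ((l2.count x : Nat) : Int)
  · rw [if_pos hp]
  · rw [if_neg hp]
    omega

-- size of A's union multiset (before inclusion-exclusion)
theorem pv_unionA_eq (l1 l2 : List (List Char)) :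
    (((pvElements (pvCounterOr (PySem.Dict.counter l1) (PySem.Dict.counter l2))).length : Nat) : Int)
      = ((PySem.Set.ofList l1).map
          (fun x => max (l1.count x : Int) (l2.count x : Int))).sum
        + ((PySem.Set.ofList l2).map
            (fun x => if x ∈ l1 then 0 else (l2.count x : Int))).sum := by
  rw [length_pvElements, pv_itemsOr, List.map_append, List.sum_append, Nat.cast_add]
  congr 1
  · rw [PySem.Dict.items_counter, List.filterMap_map]
    have h := pv_sum_toNat_filterMap (PySem.Set.ofList l1)
        (fun x => 0 < max ((l1.count x : Nat) : Int) ((PySem.Dict.counter l2).getD x 0))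
        (fun x => max ((l1.count x : Nat) : Int) ((PySem.Dict.counter l2).getD x 0))
        (fun x _ hx => le_of_lt hx)
    simp only [Function.comp_def] at h ⊢
    rw [h]
    apply congrArg
    apply List.map_congr_left
    intro x hx
    rw [PySem.Dict.getD_counter]
    have h1 : 0 < l1.count x := List.count_pos_iff.2 ((PySem.Set.mem_ofList _ _).1 hx)
    have hp : 0 < max ((l1.count x : Nat) : Int) ((l2.count x : Nat) : Int) := by omega
    rw [if_pos hp]
  · rw [PySem.Dict.items_counter, List.filterMap_map]
    have h := pv_sum_toNat_filterMap (PySem.Set.ofList l2)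
        (fun x => (PySem.Dict.counter l1).contains x = false ∧ 0 < ((l2.count x : Nat) : Int))
        (fun x => ((l2.count x : Nat) : Int))
        (fun x _ hx => le_of_lt hx.2)
    simp only [Function.comp_def] at h ⊢
    rw [h]
    apply congrArg
    apply List.map_congr_left
    intro x hx
    have h2 : 0 < l2.count x := List.count_pos_iff.2 ((PySem.Set.mem_ofList _ _).1 hx)
    by_cases hm : x ∈ l1
    · have : ¬ ((PySem.Dict.counter l1).contains x = false ∧ 0 < ((l2.count x : Nat) : Int)) := by
        intro hcc
        exact (pv_counter_contains_false_iff l1 x).1 hcc.1 hm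
      rw [if_neg this, if_pos hm]
    · have : (PySem.Dict.counter l1).contains x = false :=
        (pv_counter_contains_false_iff l1 x).2 hm
      rw [if_pos ⟨this, by omega⟩, if_neg hm]

theorem pv_sum_map_max_min {k : Type} (K : List k) (u v : k → Int) :
    (K.map (fun x => max (u x) (v x))).sum + (K.map (fun x => min (u x) (v x))).sum
      = (K.map u).sum + (K.map v).sum := by
  induction K with
  | nil => simp
  | cons a K ih =>
    simp only [List.map_cons, List.sum_cons]
    omega

-- the cross sum: counting l2-occurrences over l1's key set equals counting them over
-- l2's key set restricted to keys of l1
theorem pv_cross (l1 l2 : List (List Char)) :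
    ((PySem.Set.ofList l1).map (fun x => (l2.count x : Int))).sum
      = ((PySem.Set.ofList l2).map
          (fun x => if x ∈ l1 then (l2.count x : Int) else 0)).sum := by
  have e1 : ((PySem.Set.ofList l1).map (fun x => (l2.count x : Int))).sum
      = ((PySem.Set.ofList l1).map (fun x => if x ∈ l2 then (l2.count x : Int) else 0)).sum := by
    apply congrArg
    apply List.map_congr_left
    intro x _
    by_cases h : x ∈ l2
    · rw [if_pos h]
    · rw [if_neg h, List.count_eq_zero.2 h]
      simp
  rw [e1, pv_sum_if_filter, pv_sum_if_filter]
  have hperm : List.Perm ((PySem.Set.ofList l1).filter (fun x => decide (x ∈ l2)))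
      ((PySem.Set.ofList l2).filter (fun x => decide (x ∈ l1))) := by
    rw [List.perm_ext_iff_of_nodup ((PySem.Set.nodup_ofList l1).filter _)
      ((PySem.Set.nodup_ofList l2).filter _)]
    intro x
    simp [PySem.Set.mem_ofList, List.mem_filter, and_comm]
  exact List.Perm.sum_eq (hperm.map _)

-- inclusion-exclusion: |union| = len1 + len2 - |intersection|
theorem pv_union_size (l1 l2 : List (List Char)) :
    ((PySem.Set.ofList l1).map (fun x => max (l1.count x : Int) (l2.count x : Int))).sum
      + ((PySem.Set.ofList l2).map (fun x => if x ∈ l1 then 0 else (l2.count x : Int))).sum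
    = (l1.length : Int) + (l2.length : Int)
      - ((PySem.Set.ofList l1).map (fun x => min (l1.count x : Int) (l2.count x : Int))).sum := by
  have hmm := pv_sum_map_max_min (PySem.Set.ofList l1)
      (fun x => (l1.count x : Int)) (fun x => (l2.count x : Int))
  have hc1 : ((PySem.Set.ofList l1).map (fun x => (l1.count x : Int))).sum = l1.length :=
    pv_sum_count l1 (PySem.Set.ofList l1) (PySem.Set.nodup_ofList l1)
      (fun x hx => (PySem.Set.mem_ofList _ _).2 hx)
  have hc2 : ((PySem.Set.ofList l2).map (fun x => (l2.count x : Int))).sum = l2.length :=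
    pv_sum_count l2 (PySem.Set.ofList l2) (PySem.Set.nodup_ofList l2)
      (fun x hx => (PySem.Set.mem_ofList _ _).2 hx)
  have hsplit := pv_sum_if_split (PySem.Set.ofList l2) (fun x => x ∈ l1)
      (fun x => (l2.count x : Int))
  have hcross := pv_cross l1 l2
  omega

-- proof-side recursion mirroring the greedy loop: the matched sub-multiset
def pvBI : List (List Char) → List (List Char) → List (List Char)
  | [], _ => []
  | a :: l1, l2 => if a ∈ l2 then a :: pvBI l1 (l2.erase a) else pvBI l1 l2

-- B's greedy matching loop counts exactly the elements of pvBI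
theorem pv_greedy_pvBI (l1 : List (List Char)) :
    ∀ (l2 : List (List Char)) (acc : Int),
    (l1.foldl (fun st g => if g ∈ st.1 then (st.1.erase g, st.2 + 1) else st) (l2, acc)).2
      = acc + ((pvBI l1 l2).length : Int) := by
  induction l1 with
  | nil => intro l2 acc; simp [pvBI]
  | cons a l1 ih =>
    intro l2 acc
    by_cases h : a ∈ l2
    · rw [List.foldl_cons, if_pos h, ih, pvBI, if_pos h, List.length_cons]
      push_cast
      ring
    · rw [List.foldl_cons, if_neg h, ih, pvBI, if_neg h]

-- pvBI takes each key min(count,count) times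
theorem pvBI_count (x : List Char) (l1 : List (List Char)) :
    ∀ l2 : List (List Char), (pvBI l1 l2).count x = min (l1.count x) (l2.count x) := by
  induction l1 with
  | nil => intro l2; simp [pvBI]
  | cons a l1 ih =>
    intro l2
    by_cases h : a ∈ l2
    · rw [pvBI, if_pos h]
      have hpos : 0 < l2.count a := List.count_pos_iff.2 h
      by_cases hx : x = a
      · subst hx
        rw [List.count_cons_self, List.count_cons_self, ih,
          List.count_erase_self]
        omega
      · rw [List.count_cons_of_ne (fun he => hx he.symm),
          List.count_cons_of_ne (fun he => hx he.symm),
          ih, List.count_erase_of_ne (fun he => hx he)]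
    · rw [pvBI, if_neg h]
      by_cases hx : x = a
      · subst hx
        have h0 : l2.count x = 0 := List.count_eq_zero.2 h
        rw [List.count_cons_self, ih, h0]
        omega
      · rw [List.count_cons_of_ne (fun he => hx he.symm), ih]

theorem pvBI_subset (l1 l2 x : _) (hx : x ∈ pvBI l1 l2) : x ∈ l1 := by
  have h : 0 < (pvBI l1 l2).count x := List.count_pos_iff.2 hx
  rw [pvBI_count] at h
  exact List.count_pos_iff.1 (by omega)

-- length of the matched multiset is the per-key minima sum
theorem pv_bagInter_length (l1 l2 : List (List Char)) :
    (((pvBI l1 l2).length : Nat) : Int)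
      = ((PySem.Set.ofList l1).map
          (fun x => min (l1.count x : Int) (l2.count x : Int))).sum := by
  have h := pv_sum_count (pvBI l1 l2) (PySem.Set.ofList l1)
    (PySem.Set.nodup_ofList l1)
    (fun x hx => (PySem.Set.mem_ofList _ _).2 (pvBI_subset l1 l2 x hx))
  rw [← h]
  apply congrArg
  apply List.map_congr_left
  intro x _
  rw [pvBI_count]
  push_cast
  rfl

theorem pv_interB_eq (l1 l2 : List (List Char)) :
    (pvGreedy l1 l2).2
      = ((PySem.Set.ofList l1).map
          (fun x => min (l1.count x : Int) (l2.count x : Int))).sum := by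
  unfold pvGreedy
  rw [pv_greedy_pvBI l1 l2 0, ← pv_bagInter_length]
  simp

-- the intersection size is at most each list's length
theorem pv_inter_le1 (l1 l2 : List (List Char)) :
    ((PySem.Set.ofList l1).map (fun x => min (l1.count x : Int) (l2.count x : Int))).sum
      ≤ (l1.length : Int) := by
  have h := pv_sum_map_le (PySem.Set.ofList l1)
      (fun x => min (l1.count x : Int) (l2.count x : Int))
      (fun x => (l1.count x : Int)) (fun x _ => min_le_left _ _)
  have hc1 : ((PySem.Set.ofList l1).map (fun x => (l1.count x : Int))).sum = l1.length :=
    pv_sum_count l1 (PySem.Set.ofList l1) (PySem.Set.nodup_ofList l1)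
      (fun x hx => (PySem.Set.mem_ofList _ _).2 hx)
  omega

theorem pv_inter_le2 (l1 l2 : List (List Char)) :
    ((PySem.Set.ofList l1).map (fun x => min (l1.count x : Int) (l2.count x : Int))).sum
      ≤ (l2.length : Int) := by
  have h := pv_sum_map_le (PySem.Set.ofList l1)
      (fun x => min (l1.count x : Int) (l2.count x : Int))
      (fun x => (l2.count x : Int)) (fun x _ => min_le_right _ _)
  have hcross := pv_cross l1 l2
  have h2 := pv_sum_map_le (PySem.Set.ofList l2)
      (fun x => if x ∈ l1 then (l2.count x : Int) else 0)
      (fun x => (l2.count x : Int))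
      (fun x _ => by by_cases hm : x ∈ l1 <;> simp [hm])
  have hc2 : ((PySem.Set.ofList l2).map (fun x => (l2.count x : Int))).sum = l2.length :=
    pv_sum_count l2 (PySem.Set.ofList l2) (PySem.Set.nodup_ofList l2)
      (fun x hx => (PySem.Set.mem_ofList _ _).2 hx)
  omega

theorem pv_main (l1 l2 : List (List Char)) :
    (if (pvElements (pvCounterAnd (PySem.Dict.counter l1) (PySem.Dict.counter l2))).length = 0
        ∧ (pvElements (pvCounterOr (PySem.Dict.counter l1) (PySem.Dict.counter l2))).length = 0
     then (65536 : Int)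
     else PySem.Int.floordiv
        (((pvElements (pvCounterAnd (PySem.Dict.counter l1) (PySem.Dict.counter l2))).length : Int) * 65536)
        ((pvElements (pvCounterOr (PySem.Dict.counter l1) (PySem.Dict.counter l2))).length : Int))
    = (if ((l1.length : Int) + (l2.length : Int) - (pvGreedy l1 l2).2) = 0
       then (65536 : Int)
       else PySem.Int.floordiv ((pvGreedy l1 l2).2 * 65536)
          ((l1.length : Int) + (l2.length : Int) - (pvGreedy l1 l2).2)) := by
  rw [pv_interB_eq]
  have hIA := pv_interA_eq l1 l2
  have hUA := pv_unionA_eq l1 l2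
  have hUS := pv_union_size l1 l2
  have hle1 := pv_inter_le1 l1 l2
  have hle2 := pv_inter_le2 l1 l2
  have hU : (((pvElements (pvCounterOr (PySem.Dict.counter l1) (PySem.Dict.counter l2))).length : Nat) : Int)
      = (l1.length : Int) + (l2.length : Int)
        - ((PySem.Set.ofList l1).map (fun x => min (l1.count x : Int) (l2.count x : Int))).sum := by
    omega
  by_cases hz : ((l1.length : Int) + (l2.length : Int)
      - ((PySem.Set.ofList l1).map (fun x => min (l1.count x : Int) (l2.count x : Int))).sum) = 0
  · rw [if_pos hz, if_pos (by constructor <;> omega)]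
  · rw [if_neg hz, if_neg (by intro hcc; omega), hIA, hU]

-- ===== VERDICT (by name: the statement is the Claim_ definition above) =====
theorem solution_spec : Claim_equal_solution := by
  intro str1 str2 _
  unfold Spec_solution solution solution_alt
  simp only [← pvBigrams_eq]
  exact pv_main (pvBigramsA (PySem.Str.lower str1).toList)
    (pvBigramsA (PySem.Str.lower str2).toList)
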